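-- pv_equiv track=rewrite | github.com/jano31415/codejam | codeforces/goodbye2022/proba.py | solve
-- ===== SOURCE A (Python) =====
-- def solve(n,m, arr, brr):
--     b = sum(brr)
--     arr.sort()
--     for b in brr:
--         mina=10**9
--         mini=0
--         for i,ai in enumerate(arr):
--             if ai < mina:
--                 mina=ai
--                 mini=i
--         arr[mini] = b
--     return sum(arr)
-- ===== SOURCE B (Python) =====
-- # Different algorithm: keep the working array as a SORTED list; each step drops its
-- # head (the minimum) and inserts b at the position found by binary search, instead of
-- # A's linear min-scan + in-place overwrite.  Note: A sorts/mutates `arr` in place, B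
-- # does not touch its arguments; the equivalence claimed is about the return value only.
-- def solve(n, m, arr, brr):
--     cur = sorted(arr)
--     for b in brr:
--         rest = cur[1:]
--         lo = 0
--         hi = len(rest)
--         while lo < hi:
--             mid = (lo + hi) // 2
--             if rest[mid] < b:
--                 lo = mid + 1
--             else:
--                 hi = mid
--         cur = rest[:lo] + [b] + rest[lo:]
--     return sum(cur)
-- ===== Notes on version B (the rewrite author's own statement) =====
-- stated objective: faster
-- what changed: A rescans the whole array for its minimum at every step and overwrites it in place; B keeps the array as a sorted list, so the minimum is the head (dropped in O(1)) and each new value is placed by binary search, removing the per-step linear minimum scan.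
import Mathlib
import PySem

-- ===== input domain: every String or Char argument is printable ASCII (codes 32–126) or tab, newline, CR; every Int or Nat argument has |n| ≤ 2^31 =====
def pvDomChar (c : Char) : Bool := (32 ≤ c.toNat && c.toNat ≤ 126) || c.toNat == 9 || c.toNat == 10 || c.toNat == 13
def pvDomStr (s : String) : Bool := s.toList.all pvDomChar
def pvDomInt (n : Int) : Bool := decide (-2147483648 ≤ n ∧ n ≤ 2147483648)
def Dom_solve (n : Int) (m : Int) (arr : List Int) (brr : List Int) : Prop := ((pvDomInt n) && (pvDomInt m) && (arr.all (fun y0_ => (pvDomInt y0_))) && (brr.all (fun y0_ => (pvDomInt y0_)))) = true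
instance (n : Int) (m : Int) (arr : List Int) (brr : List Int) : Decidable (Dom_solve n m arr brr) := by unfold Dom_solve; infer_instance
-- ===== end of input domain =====

-- B keeps the working array as a sorted list (drop the head = the minimum, insert by
-- binary search) instead of A's per-step linear minimum scan; objective: faster.
-- A sorts/mutates `arr` in place; the equivalence proved is about the return value only.

-- ===== PORT A =====
-- the inner scan step: "if ai < mina: mina=ai; mini=i"  (state s = (mina, mini), item q = (i, ai))
def pvScanStep (s : Int × Int) (q : Int × Int) : Int × Int :=
  if q.2 < s.1 then (q.2, q.1) else s

-- one iteration of "for b in brr": the min-scan, then arr[mini] = b (in range under Pre_)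
def pvStepA (acc : List Int) (b : Int) : List Int :=
  let p := (PySem.List.enumerate acc 0).foldl pvScanStep (10 ^ 9, 0)   -- mina=10**9; mini=0; scan
  PySem.List.pySetD acc p.2 b                                          -- arr[mini] = b

def solve (n : Int) (m : Int) (arr : List Int) (brr : List Int) : Int :=
  let _b : Int := brr.sum                                -- b = sum(brr)  (immediately shadowed)
  let arr1 := PySem.List.sorted arr (fun x => x) false   -- arr.sort()
  let arr2 := brr.foldl pvStepA arr1                     -- for b in brr: …
  arr2.sum                                               -- return sum(arr)

-- ===== PORT B =====
-- the while loop "lo=0; hi=len(rest); while lo<hi: mid=(lo+hi)//2; …": lo, hi, mid are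
-- nonnegative ints, so Nat with Nat division is exact; rest.getD mid 0 is exact for
-- rest[mid] since mid < hi ≤ len(rest) at every call
def pvBS (rest : List Int) (b : Int) (lo hi : Nat) : Nat :=
  if h : lo < hi then
    if rest.getD ((lo + hi) / 2) 0 < b then pvBS rest b ((lo + hi) / 2 + 1) hi
    else pvBS rest b lo ((lo + hi) / 2)
  else lo
termination_by hi - lo
decreasing_by all_goals omega

-- one iteration of "for b in brr": drop the head, insert b at the binary-search position
def pvStepB (cur : List Int) (b : Int) : List Int :=
  let rest := PySem.List.slice cur (some 1) none          -- rest = cur[1:]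
  let lo := pvBS rest b 0 rest.length                     -- the while loop
  PySem.List.slice rest none (some (lo : Int)) ++ [b]
    ++ PySem.List.slice rest (some (lo : Int)) none       -- rest[:lo] + [b] + rest[lo:]

def solve_alt (n : Int) (m : Int) (arr : List Int) (brr : List Int) : Int :=
  let cur0 := PySem.List.sorted arr (fun x => x) false    -- cur = sorted(arr)
  let curF := brr.foldl pvStepB cur0                      -- for b in brr: …
  curF.sum                                                -- return sum(cur)

-- ===== PRECONDITION & SPEC =====
-- Pre_ excludes (i) empty arr with nonempty brr, where A raises IndexError, and
-- (ii) inputs containing a value ≥ 10**9, A's minimum-scan sentinel: the natural domain of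
-- this competitive-programming solve is values below that bound, and on larger values A's
-- scan silently skips elements (see claim.json cites for an excluded input A returns on).
def Pre_solve (n : Int) (m : Int) (arr : List Int) (brr : List Int) : Prop :=
  (arr = [] → brr = []) ∧ (∀ x ∈ arr, x < 10 ^ 9) ∧ (∀ x ∈ brr, x < 10 ^ 9)
instance (n : Int) (m : Int) (arr : List Int) (brr : List Int) : Decidable (Pre_solve n m arr brr) := by unfold Pre_solve; infer_instance

def pvWitness_solve : Int × Int × List Int × List Int := (3, 2, [5, 1, 4], [2, 6])

def Spec_solve (n : Int) (m : Int) (arr : List Int) (brr : List Int) (out : Int) : Prop := out = solve_alt n m arr brr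
instance (n : Int) (m : Int) (arr : List Int) (brr : List Int) (out : Int) : Decidable (Spec_solve n m arr brr out) := by unfold Spec_solve; infer_instance

-- ===== CLAIM (what is proved, stated in full; the proofs are below) =====
def Claim_equal_solve : Prop := ∀ (n : Int) (m : Int) (arr : List Int) (brr : List Int), Dom_solve n m arr brr → Pre_solve n m arr brr → Spec_solve n m arr brr (solve n m arr brr)

-- ===== LEMMAS AND PROOFS =====

-- A's inner scan yields either the untouched initial state or a (value, index)
-- pair of the enumerate list, and its value is ≤ the initial value and everything seen
lemma pvScan_fold (l : List (Int × Int)) (s : Int × Int) :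
    (l.foldl pvScanStep s = s ∨ ((l.foldl pvScanStep s).2, (l.foldl pvScanStep s).1) ∈ l) ∧
    (l.foldl pvScanStep s).1 ≤ s.1 ∧ ∀ p ∈ l, (l.foldl pvScanStep s).1 ≤ p.2 := by
  induction l generalizing s with
  | nil => simp
  | cons q t ih =>
    simp only [List.foldl_cons]
    by_cases hq : q.2 < s.1
    · have hstep : pvScanStep s q = (q.2, q.1) := by unfold pvScanStep; rw [if_pos hq]
      rw [hstep]
      rcases ih (q.2, q.1) with ⟨h1, h2, h3⟩
      refine ⟨?_, by omega, ?_⟩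
      · rcases h1 with h1 | h1
        · right; rw [h1]; simp
        · right; exact List.mem_cons_of_mem _ h1
      · intro p hp
        rcases List.mem_cons.mp hp with rfl | hp
        · omega
        · exact h3 p hp
    · have hstep : pvScanStep s q = s := by unfold pvScanStep; rw [if_neg hq]
      rw [hstep]
      rcases ih s with ⟨h1, h2, h3⟩
      refine ⟨?_, h2, ?_⟩
      · rcases h1 with h1 | h1
        · left; exact h1
        · right; exact List.mem_cons_of_mem _ h1
      · intro p hp
        rcases List.mem_cons.mp hp with rfl | hp
        · omega
        · exact h3 p hp

-- on a nonempty all-below-sentinel list, A's scan returns an index holding a minimum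
lemma pvScan_spec (acc : List Int) (hne : acc ≠ []) (hlt : ∀ x ∈ acc, x < 10 ^ 9) :
    ∃ (k : Nat) (hk : k < acc.length),
      ((PySem.List.enumerate acc 0).foldl pvScanStep (10 ^ 9, 0)).2 = (k : Int) ∧
      acc[k] = ((PySem.List.enumerate acc 0).foldl pvScanStep (10 ^ 9, 0)).1 ∧
      ∀ x ∈ acc, ((PySem.List.enumerate acc 0).foldl pvScanStep (10 ^ 9, 0)).1 ≤ x := by
  obtain ⟨h1, h2, h3⟩ := pvScan_fold (PySem.List.enumerate acc 0) (10 ^ 9, 0)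
  set r := (PySem.List.enumerate acc 0).foldl pvScanStep (10 ^ 9, 0) with hr
  have hmin : ∀ x ∈ acc, r.1 ≤ x := by
    intro x hx
    have hx' : x ∈ (PySem.List.enumerate acc 0).map (·.2) := by
      rw [PySem.List.map_snd_enumerate]; exact hx
    obtain ⟨p, hp, hpx⟩ := List.mem_map.mp hx'
    have := h3 p hp
    omega
  rcases h1 with h1 | h1
  · exfalso
    obtain ⟨y, hy⟩ := List.exists_mem_of_ne_nil acc hne
    have hy1 := hmin y hy
    have hy2 := hlt y hy
    have : r.1 = 10 ^ 9 := by rw [h1]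
    omega
  · rw [PySem.List.mem_enumerate_iff] at h1
    obtain ⟨k, hk, hkeq⟩ := h1
    refine ⟨k, hk, ?_, ?_, hmin⟩
    · have := congrArg Prod.fst hkeq
      simpa using this
    · have := congrArg Prod.snd hkeq
      simpa using this.symm

-- B's binary search lands between the elements < b and the elements ≥ b
lemma pvBS_go (rest : List Int) (b : Int)
    (hs : ∀ (i j : Nat) (hi : i < rest.length) (hj : j < rest.length), i ≤ j → rest[i] ≤ rest[j]) :
    ∀ (fuel lo hi : Nat), hi - lo ≤ fuel → lo ≤ hi → hi ≤ rest.length →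
      (∀ (j : Nat) (h : j < rest.length), j < lo → rest[j] < b) →
      (∀ (j : Nat) (h : j < rest.length), hi ≤ j → b ≤ rest[j]) →
      (∀ (j : Nat) (h : j < rest.length), j < pvBS rest b lo hi → rest[j] < b) ∧
      (∀ (j : Nat) (h : j < rest.length), pvBS rest b lo hi ≤ j → b ≤ rest[j]) ∧
      pvBS rest b lo hi ≤ rest.length := by
  intro fuel
  induction fuel with
  | zero =>
    intro lo hi hf hlh hhl hlo hhi
    have hnl : ¬ lo < hi := by omega
    rw [pvBS, dif_neg hnl]
    exact ⟨hlo, fun j h hj => hhi j h (by omega), by omega⟩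
  | succ f ih =>
    intro lo hi hf hlh hhl hlo hhi
    by_cases hcase : lo < hi
    · rw [pvBS, dif_pos hcase]
      have hmlt : (lo + hi) / 2 < rest.length := by omega
      rw [List.getD_eq_getElem rest 0 hmlt]
      by_cases hv : rest[(lo + hi) / 2] < b
      · rw [if_pos hv]
        refine ih ((lo + hi) / 2 + 1) hi (by omega) (by omega) hhl ?_ hhi
        intro j h hj
        exact lt_of_le_of_lt (hs j ((lo + hi) / 2) h hmlt (by omega)) hv
      · rw [if_neg hv]
        refine ih lo ((lo + hi) / 2) (by omega) (by omega) (by omega) hlo ?_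
        intro j h hj
        exact le_trans (le_of_not_gt hv) (hs ((lo + hi) / 2) j hmlt h hj)
    · rw [pvBS, dif_neg hcase]
      exact ⟨hlo, fun j h hj => hhi j h (by omega), by omega⟩

-- one B step on a sorted nonempty list: a permutation of b :: tail, and still sorted
lemma pvStepB_spec (h : Int) (t : List Int) (b : Int)
    (hsort : (h :: t).Pairwise (· ≤ ·)) :
    (pvStepB (h :: t) b).Perm (b :: t) ∧ (pvStepB (h :: t) b).Pairwise (· ≤ ·) := by
  have htail : PySem.List.slice (h :: t) (some 1) none = t := by
    rw [PySem.List.slice_from_one]; rfl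
  have htsort : t.Pairwise (· ≤ ·) := (List.pairwise_cons.mp hsort).2
  have hs : ∀ (i j : Nat) (hi : i < t.length) (hj : j < t.length), i ≤ j → t[i] ≤ t[j] := by
    intro i j hi hj hij
    rcases Nat.lt_or_ge i j with hlt | hge
    · exact List.pairwise_iff_getElem.mp htsort i j hi hj hlt
    · have : i = j := by omega
      subst this; exact le_refl _
  obtain ⟨P1, P2, Plen⟩ := pvBS_go t b hs t.length 0 t.length (by omega) (by omega)
      (le_refl _) (fun j h hj => by omega) (fun j h hj => by omega)
  have hform : pvStepB (h :: t) b =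
      t.take (pvBS t b 0 t.length) ++ [b] ++ t.drop (pvBS t b 0 t.length) := by
    simp only [pvStepB, htail, PySem.List.slice_to_natCast, PySem.List.slice_from_natCast]
  set p := pvBS t b 0 t.length with hp
  rw [hform]
  constructor
  · have h1 := @List.perm_middle _ b (t.take p) (t.drop p)
    rw [List.take_append_drop] at h1
    simpa [List.append_assoc] using h1
  · have hmemtake : ∀ x ∈ t.take p, x < b := by
      intro x hx
      obtain ⟨i, hi, hix⟩ := List.mem_iff_getElem.mp hx
      rw [List.length_take] at hi
      have hilen : i < t.length := by omega
      have hgt : (t.take p)[i] = t[i] := List.getElem_take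
      rw [hgt] at hix
      have hip : i < p := by omega
      rw [← hix]
      exact P1 i hilen hip
    have hmemdrop : ∀ y ∈ t.drop p, b ≤ y := by
      intro y hy
      obtain ⟨i, hi, hiy⟩ := List.mem_iff_getElem.mp hy
      rw [List.length_drop] at hi
      have hpi : p + i < t.length := by omega
      have : (t.drop p)[i] = t[p + i] := List.getElem_drop
      rw [this] at hiy
      rw [← hiy]
      exact P2 (p + i) hpi (by omega)
    have : (t.take p ++ (b :: t.drop p)).Pairwise (· ≤ ·) := by
      rw [List.pairwise_append]
      refine ⟨htsort.sublist (List.take_sublist p t), ?_, ?_⟩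
      · rw [List.pairwise_cons]
        exact ⟨hmemdrop, htsort.sublist (List.drop_sublist p t)⟩
      · intro x hx y hy
        rcases List.mem_cons.mp hy with rfl | hy
        · exact le_of_lt (hmemtake x hx)
        · exact le_trans (le_of_lt (hmemtake x hx)) (hmemdrop y hy)
    simpa [List.append_assoc] using this
-- one A step on a nonempty all-below-sentinel list: removes an occurrence of a minimum
lemma pvStepA_spec (acc : List Int) (b : Int) (hne : acc ≠ []) (hlt : ∀ x ∈ acc, x < 10 ^ 9) :
    ∃ (mval : Int) (l' : List Int), (∀ x ∈ acc, mval ≤ x) ∧ mval ∈ acc ∧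
      acc.Perm (mval :: l') ∧ (pvStepA acc b).Perm (b :: l') := by
  obtain ⟨k, hk, h2eq, hval, hmin⟩ := pvScan_spec acc hne hlt
  have hdecomp : acc = acc.take k ++ acc[k] :: acc.drop (k + 1) := by
    conv_lhs => rw [← List.take_append_drop k acc]
    rw [List.drop_eq_getElem_cons hk]
  refine ⟨acc[k], acc.eraseIdx k, ?_, List.getElem_mem hk, ?_, ?_⟩
  · intro x hx; rw [hval]; exact hmin x hx
  · have h1 := @List.perm_middle _ acc[k] (acc.take k) (acc.drop (k + 1))
    rw [← List.eraseIdx_eq_take_drop_succ, ← hdecomp] at h1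
    exact h1
  · have hform : pvStepA acc b = acc.set k b := by
      show PySem.List.pySetD acc
          ((PySem.List.enumerate acc 0).foldl pvScanStep (10 ^ 9, 0)).2 b = acc.set k b
      rw [h2eq]
      simp [PySem.List.pySetD_natCast]
    rw [hform]
    have h1 := @List.perm_middle _ b (acc.take k) (acc.drop (k + 1))
    rw [← List.eraseIdx_eq_take_drop_succ, ← List.set_eq_take_cons_drop b hk] at h1
    exact h1

-- the main loop invariant: A's array stays a permutation of B's sorted list
lemma pvFold_equiv (bs : List Int) : ∀ (a c : List Int), a.Perm c → c.Pairwise (· ≤ ·) →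
    (∀ x ∈ a, x < 10 ^ 9) → (∀ x ∈ bs, x < 10 ^ 9) → a ≠ [] →
    (bs.foldl pvStepA a).sum = (bs.foldl pvStepB c).sum := by
  induction bs with
  | nil =>
    intro a c hp _ _ _ _
    simpa using hp.sum_eq
  | cons b bs ih =>
    intro a c hp hsort ha hbs hne
    simp only [List.foldl_cons]
    have hb : b < 10 ^ 9 := hbs b (by simp)
    obtain ⟨mval, l', hminv, hmem, hpa, hpa'⟩ := pvStepA_spec a b hne ha
    cases c with
    | nil =>
      exfalso
      have := hp.length_eq
      simp at this
      exact hne this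
    | cons h t =>
      obtain ⟨hpb, hsb⟩ := pvStepB_spec h t b hsort
      have hmval_h : mval = h := by
        have h1 : mval ≤ h := hminv h (hp.mem_iff.mpr (by simp))
        have h2 : h ≤ mval := by
          rcases List.mem_cons.mp (hp.mem_iff.mp hmem) with rfl | hmt
          · exact le_refl _
          · exact (List.pairwise_cons.mp hsort).1 mval hmt
        omega
      have hlt' : l'.Perm t := by
        have hcc : (mval :: l').Perm (h :: t) := hpa.symm.trans hp
        rw [hmval_h] at hcc
        exact hcc.cons_inv
      apply ih
      · exact hpa'.trans ((hlt'.cons b).trans hpb.symm)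
      · exact hsb
      · intro x hx
        rcases List.mem_cons.mp (hpa'.mem_iff.mp hx) with rfl | hx'
        · exact hb
        · exact ha x (hpa.mem_iff.mpr (List.mem_cons_of_mem _ (hlt'.mem_iff.mpr (hlt'.mem_iff.mp hx'))))
      · intro x hx
        exact hbs x (List.mem_cons_of_mem _ hx)
      · intro hnil
        have := hpa'.length_eq
        rw [hnil] at this
        simp at this

-- ===== VERDICT (by name: the statement is the Claim_ definition above) =====
theorem solve_spec : Claim_equal_solve := by
  intro n m arr brr _hdom hpre
  obtain ⟨hnil, harr, hbrr⟩ := hpre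
  unfold Spec_solve
  simp only [solve, solve_alt]
  rcases List.eq_nil_or_concat brr with rfl | hbne
  · simp
  · apply pvFold_equiv
    · exact List.Perm.refl _
    · exact PySem.List.sorted_pairwise arr (fun x => x)
    · intro x hx
      rw [PySem.List.mem_sorted] at hx
      exact harr x hx
    · exact hbrr
    · intro hs0
      rw [PySem.List.sorted_eq_nil_iff] at hs0
      obtain ⟨l, x, rfl⟩ := hbne
      simpa using hnil hs0
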